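-- pv_equiv track=rewrite | github.com/johnwasham/python-solutions | solutions/string_iterations/end_to_middle_start_to_middle.py | special_order
-- ===== SOURCE A (Python) =====
-- def special_order(input_string):
--     chars = []
--     n = len(input_string)
--     for i in range((n + 1) // 2):
--         chars.append(input_string[n - 1 - i])
--     for i in range(n // 2):
--         chars.append(input_string[i])
--
--     return ''.join(chars)
-- ===== SOURCE B (Python) =====
-- def special_order(input_string):
--     m = len(input_string) // 2
--     return input_string[m:][::-1] + input_string[:m]
-- ===== Notes on version B (the rewrite author's own statement) =====
-- stated objective: simpler
-- what changed: Replaced the two index-driven append loops and list+join with two slice operations: the back half (from the floor midpoint) reversed concatenated with the front half; measured faster by a constant factor since slicing avoids the per-character Python-level loop.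
import Mathlib
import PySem

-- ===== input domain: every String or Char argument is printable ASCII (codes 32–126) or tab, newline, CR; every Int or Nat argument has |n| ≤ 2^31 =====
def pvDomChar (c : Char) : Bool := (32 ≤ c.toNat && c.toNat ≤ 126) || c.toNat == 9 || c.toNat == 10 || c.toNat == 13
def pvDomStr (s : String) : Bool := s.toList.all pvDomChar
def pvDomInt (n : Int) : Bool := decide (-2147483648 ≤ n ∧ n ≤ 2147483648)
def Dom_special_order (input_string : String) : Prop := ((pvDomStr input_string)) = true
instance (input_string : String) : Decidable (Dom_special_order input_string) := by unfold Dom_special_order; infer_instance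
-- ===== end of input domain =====

-- B replaces A's two index-driven append loops + join with two slices: back half reversed ++ front half (same values; objective: simpler).
-- ===== PORT A =====
def special_order (input_string : String) : String :=
  let cs := input_string.toList
  let n : Int := cs.length
  let chars1 := (PySem.List.pyRange 0 (PySem.Int.floordiv (n + 1) 2) 1).foldl
      (fun acc i => acc ++ [PySem.List.pyGetD cs (n - 1 - i) ' ']) []
  let chars := (PySem.List.pyRange 0 (PySem.Int.floordiv n 2) 1).foldl
      (fun acc i => acc ++ [PySem.List.pyGetD cs i ' ']) chars1
  String.ofList chars

-- ===== PORT B =====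
def special_order_alt (input_string : String) : String :=
  let cs := input_string.toList
  let m : Int := PySem.Int.floordiv cs.length 2
  String.ofList ((PySem.List.slice cs (some m) none).reverse ++ PySem.List.slice cs none (some m))

-- ===== PRECONDITION & SPEC =====
def Spec_special_order (input_string : String) (out : String) : Prop := out = special_order_alt input_string
instance (input_string : String) (out : String) : Decidable (Spec_special_order input_string out) := by unfold Spec_special_order; infer_instance

-- ===== CLAIM (what is proved, stated in full; the proofs are below) =====
def Claim_equal_special_order : Prop := ∀ (input_string : String), Dom_special_order input_string → Spec_special_order input_string (special_order input_string)

-- ===== LEMMAS AND PROOFS =====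

-- ===== VERDICT (by name: the statement is the Claim_ definition above) =====
-- first loop builds the reversed back half
lemma map_back_half {α : Type} (cs : List α) (d : α) :
    (List.range (cs.length - cs.length / 2)).map
      (fun k => cs.getD (cs.length - 1 - k) d) = (cs.drop (cs.length / 2)).reverse := by
  apply List.ext_getElem
  · simp
  · intro i h1 h2
    simp only [List.length_map, List.length_range, List.length_reverse, List.length_drop] at h1 h2
    simp only [List.getElem_map, List.getElem_range, List.getElem_reverse, List.getElem_drop,
      List.length_drop]
    rw [List.getD_eq_getElem]
    · congr 1
      omega
    · omega

-- second loop builds the front half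
lemma map_front_half {α : Type} (cs : List α) (d : α) (m : Nat) (hm : m ≤ cs.length) :
    (List.range m).map (fun k => cs.getD k d) = cs.take m := by
  apply List.ext_getElem
  · simp [hm]
  · intro i h1 h2
    simp only [List.getElem_map, List.getElem_range, List.getElem_take]
    rw [List.getD_eq_getElem]

theorem special_order_spec : Claim_equal_special_order := by
  intro s _
  unfold Spec_special_order special_order special_order_alt
  simp only
  set cs := s.toList with hcs
  have h1 : PySem.Int.floordiv ((cs.length : Int) + 1) 2 = (((cs.length + 1) / 2 : Nat) : Int) := by
    exact_mod_cast PySem.Int.floordiv_natCast (cs.length + 1) 2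
  have h2 : PySem.Int.floordiv (cs.length : Int) 2 = ((cs.length / 2 : Nat) : Int) := by
    exact_mod_cast PySem.Int.floordiv_natCast cs.length 2
  rw [h1, h2, PySem.List.slice_from_natCast, PySem.List.slice_to_natCast,
      PySem.List.pyRange_zero_nat, PySem.List.pyRange_zero_nat,
      PySem.List.foldl_append_singleton_eq_map, PySem.List.foldl_append_singleton_eq_map]
  simp only [List.map_map, Function.comp_def]
  have e1 : (List.range ((cs.length + 1) / 2)).map
      (fun k : Nat => PySem.List.pyGetD cs ((cs.length : Int) - 1 - (k : Int)) ' ')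
      = (cs.drop (cs.length / 2)).reverse := by
    rw [← map_back_half cs ' ']
    apply List.ext_getElem
    · simp; omega
    · intro i h1' h2'
      simp only [List.getElem_map, List.getElem_range]
      simp only [List.length_map, List.length_range] at h1' h2'
      have hi : i < (cs.length + 1) / 2 := h1'
      have hlt : (cs.length : Int) - 1 - (i : Int) = ((cs.length - 1 - i : Nat) : Int) := by
        omega
      rw [hlt, PySem.List.pyGetD_natCast]

  have e2 : (List.range (cs.length / 2)).map
      (fun k : Nat => PySem.List.pyGetD cs (k : Int) ' ') = cs.take (cs.length / 2) := by
    rw [← map_front_half cs ' ' (cs.length / 2) (by omega)]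
    simp [PySem.List.pyGetD_natCast]
  rw [e1, e2, List.nil_append]
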